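-- pv_equiv track=rewrite | github.com/andredesouza1/MedDoc | local_phi_sentence_highlighter/ST_sentence_match.py | create_sentence_array
-- ===== SOURCE A (Python) =====
-- def create_sentence_array(sentence):
--     words = []
--     words = sentence.split()
--     sentences = []
--     local_string = ''
--
--     for word in words:
--         if has_sentence_ending_punctuation(word):
--             local_string = local_string + ' ' + word
--             sentences.append(local_string)
--             local_string = ''
--         else:
--             local_string = local_string + ' '+ word
--     return sentences
--
-- def has_sentence_ending_punctuation(text):
--     sentence_ending_punctuation = {'.', '?', '!', ':'}
--     for char in text:
--         if char in sentence_ending_punctuation: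
--             return True
--     return False
-- ===== SOURCE B (Python) =====
-- def has_sentence_ending_punctuation(text):
--     sentence_ending_punctuation = {'.', '?', '!', ':'}
--     for char in text:
--         if char in sentence_ending_punctuation:
--             return True
--     return False
--
--
-- def create_sentence_array(sentence):
--     words = sentence.split()
--     boundaries = [i for i, w in enumerate(words)
--                   if has_sentence_ending_punctuation(w)]
--     sentences = []
--     prev = 0
--     for idx in boundaries:
--         sentences.append(' ' + ' '.join(words[prev:idx + 1]))
--         prev = idx + 1
--     return sentences
-- ===== Notes on version B (the rewrite author's own statement) =====
-- stated objective: alternative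
-- what changed: Replaces A's single fold that threads a growing accumulator string with a boundary-index pass: collect the indices of punctuation-bearing words, then slice words[prev:idx+1] per boundary and join each chunk once; words after the last boundary are dropped by construction instead of by discarding leftover state.
import Mathlib
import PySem

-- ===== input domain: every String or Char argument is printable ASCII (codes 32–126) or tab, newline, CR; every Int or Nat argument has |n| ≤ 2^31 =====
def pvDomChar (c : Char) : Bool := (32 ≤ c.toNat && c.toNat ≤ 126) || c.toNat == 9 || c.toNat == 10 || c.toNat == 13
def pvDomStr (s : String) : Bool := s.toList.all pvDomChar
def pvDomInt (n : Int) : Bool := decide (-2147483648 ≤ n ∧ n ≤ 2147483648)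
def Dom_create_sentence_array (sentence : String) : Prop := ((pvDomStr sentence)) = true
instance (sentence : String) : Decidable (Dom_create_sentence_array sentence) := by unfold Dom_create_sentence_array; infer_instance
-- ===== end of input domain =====

-- B groups words by first collecting boundary indices and slicing+joining each chunk, instead of A's
-- single fold threading a growing accumulator string; same cost, different decomposition.


-- ===== PORT A =====
-- shared helper (module-level in the Python source, reused verbatim by B):
-- loop over the characters with early return on membership in {'.','?','!',':'}
def hasPunctLoop : List Char → Bool
  | [] => false
  | c :: cs => if ['.', '?', '!', ':'].contains c then true else hasPunctLoop cs

def has_sentence_ending_punctuation (text : String) : Bool :=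
  hasPunctLoop text.toList

def create_sentence_array (sentence : String) : List String :=
  let words := PySem.Str.split₀ sentence
  (words.foldl
    (fun (st : List String × String) word =>
      if has_sentence_ending_punctuation word then
        (st.1 ++ [st.2 ++ " " ++ word], "")
      else
        (st.1, st.2 ++ " " ++ word))
    ([], "")).1

-- ===== PORT B =====
def create_sentence_array_alt (sentence : String) : List String :=
  let words := PySem.Str.split₀ sentence
  let boundaries := (PySem.List.enumerate words 0).filterMap
    (fun p => if has_sentence_ending_punctuation p.2 then some p.1 else none)
  (boundaries.foldl
    (fun (st : List String × Int) idx =>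
      (st.1 ++ [" " ++ PySem.Str.join " " (PySem.List.slice words (some st.2) (some (idx + 1)))],
       idx + 1))
    ([], 0)).1

-- ===== PRECONDITION & SPEC =====
def Spec_create_sentence_array (sentence : String) (out : List String) : Prop := out = create_sentence_array_alt sentence
instance (sentence : String) (out : List String) : Decidable (Spec_create_sentence_array sentence out) := by unfold Spec_create_sentence_array; infer_instance

-- ===== CLAIM (what is proved, stated in full; the proofs are below) =====
def Claim_equal_create_sentence_array : Prop := ∀ (sentence : String), Dom_create_sentence_array sentence → Spec_create_sentence_array sentence (create_sentence_array sentence)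

-- ===== LEMMAS AND PROOFS =====

-- Common intermediate: the sentences produced from word list `ws` with pending words `pend`.
def strOf (pend : List String) : String :=
  pend.foldl (fun a w => a ++ " " ++ w) ""

def specL : List String → List String → List String
  | [], _ => []
  | w :: ws, pend =>
      if has_sentence_ending_punctuation w then
        strOf (pend ++ [w]) :: specL ws []
      else
        specL ws (pend ++ [w])

theorem strOf_append_singleton (pend : List String) (w : String) :
    strOf (pend ++ [w]) = strOf pend ++ " " ++ w := by
  simp [strOf, List.foldl_append]

-- A's fold computes specL.
theorem foldA_eq_specL (ws : List String) (acc : List String) (pend : List String) :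
    (ws.foldl
      (fun (st : List String × String) word =>
        if has_sentence_ending_punctuation word then
          (st.1 ++ [st.2 ++ " " ++ word], "")
        else
          (st.1, st.2 ++ " " ++ word))
      (acc, strOf pend)).1 = acc ++ specL ws pend := by
  induction ws generalizing acc pend with
  | nil => simp [specL]
  | cons w ws ih =>
      rw [List.foldl_cons]
      by_cases h : has_sentence_ending_punctuation w = true
      · rw [if_pos h]
        have h0 := ih (acc ++ [strOf pend ++ " " ++ w]) []
        simp only [show strOf ([] : List String) = "" from rfl] at h0
        rw [h0]
        simp [specL, h, strOf_append_singleton]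
      · rw [if_neg (by simp [h])]
        rw [show strOf pend ++ " " ++ w = strOf (pend ++ [w]) from (strOf_append_singleton _ _).symm]
        rw [ih]
        simp [specL, h]

theorem foldl_strOf_toList (M : List String) (s : String) :
    (M.foldl (fun a w => a ++ " " ++ w) s).toList = s.toList ++ (strOf M).toList := by
  induction M generalizing s with
  | nil => simp [strOf]
  | cons y M ih =>
      simp only [List.foldl_cons]
      rw [ih]
      have h2 : (strOf (y :: M)).toList
          = (("" ++ " " ++ y : String)).toList ++ (strOf M).toList := by
        simpa only [strOf, List.foldl_cons] using ih ("" ++ " " ++ y)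
      rw [h2]
      simp

theorem strOf_cons_toList (y : String) (M : List String) :
    (strOf (y :: M)).toList = ' ' :: y.toList ++ (strOf M).toList := by
  simp only [strOf, List.foldl_cons]
  rw [foldl_strOf_toList]
  simp [strOf]

-- " " + " ".join(L ++ [x]) is A's accumulated string for those words.
theorem space_join_eq_strOf (L : List String) (x : String) :
    " " ++ PySem.Str.join " " (L ++ [x]) = strOf (L ++ [x]) := by
  apply String.toList_injective
  induction L with
  | nil =>
      simp [PySem.Str.join, PySem.Chars.join_singleton, strOf]
  | cons y L ih =>
      rw [List.cons_append, strOf_cons_toList]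
      cases L with
      | nil =>
          simp [PySem.Str.join, PySem.Chars.join_cons_cons,
                PySem.Chars.join_singleton, strOf]
      | cons z L' =>
          rw [← ih]
          simp [PySem.Str.join, PySem.Chars.join_cons_cons]

-- boundaries of a word list, relative start index s
def bnd (ws : List String) (s : Int) : List Int :=
  (PySem.List.enumerate ws s).filterMap
    (fun p => if has_sentence_ending_punctuation p.2 then some p.1 else none)

theorem bnd_nil (s : Int) : bnd [] s = [] := rfl

theorem bnd_cons (w : String) (ws : List String) (s : Int) :
    bnd (w :: ws) s =
      (if has_sentence_ending_punctuation w then [s] else []) ++ bnd ws (s + 1) := by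
  by_cases h : has_sentence_ending_punctuation w = true <;>
    simp [bnd, PySem.List.enumerate_cons, h]

-- B's fold over the boundary list computes specL.
theorem foldB_eq_specL (ws P acc : List String) (q : Nat) (hq : q ≤ P.length) :
    ((bnd ws (P.length : Int)).foldl
      (fun (st : List String × Int) idx =>
        (st.1 ++ [" " ++ PySem.Str.join " "
            (PySem.List.slice (P ++ ws) (some st.2) (some (idx + 1)))],
         idx + 1))
      (acc, (q : Int))).1 = acc ++ specL ws (P.drop q) := by
  induction ws generalizing P acc q with
  | nil => simp [bnd_nil, specL]
  | cons w ws ih =>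
      rw [bnd_cons]
      have hF : P ++ w :: ws = (P ++ [w]) ++ ws := by simp
      have hs : (P.length : Int) + 1 = (((P ++ [w]).length : Nat) : Int) := by
        push_cast; simp
      by_cases h : has_sentence_ending_punctuation w = true
      · rw [if_pos h, List.singleton_append, List.foldl_cons]
        have hslice : PySem.List.slice (P ++ w :: ws) (some (q : Int))
            (some ((P.length : Int) + 1)) = P.drop q ++ [w] := by
          rw [show ((P.length : Int) + 1) = ((P.length + 1 : Nat) : Int) by omega]
          rw [PySem.List.slice_natCast]
          rw [List.drop_append_of_le_length hq]
          rw [show P.drop q ++ w :: ws = (P.drop q ++ [w]) ++ ws by simp]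
          rw [show P.length + 1 - q = (P.drop q ++ [w]).length by simp; omega]
          exact List.take_left
        rw [hslice, space_join_eq_strOf, hF, hs]
        have h0 := ih (P ++ [w]) (acc ++ [strOf (P.drop q ++ [w])]) (P ++ [w]).length (le_refl _)
        rw [h0]
        simp [specL, h]
      · rw [if_neg (by simp [h]), List.nil_append, hF, hs]
        have h0 := ih (P ++ [w]) acc q (by simp; omega)
        rw [h0]
        rw [List.drop_append_of_le_length hq]
        simp [specL, h]

-- ===== VERDICT (by name: the statement is the Claim_ definition above) =====
theorem create_sentence_array_spec : Claim_equal_create_sentence_array := by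
  intro s _
  unfold Spec_create_sentence_array create_sentence_array create_sentence_array_alt
  have hA := foldA_eq_specL (PySem.Str.split₀ s) [] []
  have hB := foldB_eq_specL (PySem.Str.split₀ s) [] [] 0 (le_refl _)
  simp only [strOf, List.foldl_nil, List.nil_append, List.drop_nil,
    List.length_nil, Nat.cast_zero] at hA hB
  rw [hA]
  simpa [bnd] using hB.symm
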